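-- pv_equiv track=rewrite | github.com/gnud-gnaoh/AquaEmiWeb | app.py | cleanup_name
-- ===== SOURCE A (Python) =====
-- def cleanup_name(name):
--     parts = name.split(',')
--     # remove suffix until enough characters
--     char_count = sum(len(i) for i in parts)
--     LIMIT = 30
--     while char_count > LIMIT and len(parts) > 1:
--         char_count -= len(parts[-1])
--         del(parts[-1])
--     return ','.join(parts)
-- ===== SOURCE B (Python) =====
-- from itertools import accumulate
--
--
-- def cleanup_name(name):
--     parts = name.split(',')
--     cums = list(accumulate(len(p) for p in parts))
--     keep = max(1, sum(1 for s in cums if s <= 30))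
--     return ','.join(parts[:keep])
-- ===== Notes on version B (the rewrite author's own statement) =====
-- stated objective: alternative
-- what changed: B computes the cut point forward from a prefix-sum table of part lengths (count of cumulative sums <= 30, at least 1) and joins that prefix, instead of A's backward while-loop that deletes trailing parts and decrements a running total.
import Mathlib
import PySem

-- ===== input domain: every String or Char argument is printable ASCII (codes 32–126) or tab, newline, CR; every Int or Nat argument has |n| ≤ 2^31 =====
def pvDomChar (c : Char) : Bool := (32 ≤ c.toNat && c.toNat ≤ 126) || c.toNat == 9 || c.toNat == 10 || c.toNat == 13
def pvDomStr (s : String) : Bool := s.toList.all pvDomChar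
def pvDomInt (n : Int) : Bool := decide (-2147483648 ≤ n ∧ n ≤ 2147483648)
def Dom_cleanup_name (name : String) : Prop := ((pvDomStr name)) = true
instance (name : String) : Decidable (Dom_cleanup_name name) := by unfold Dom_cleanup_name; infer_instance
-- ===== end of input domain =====

-- B rebuilds the kept prefix forward from a prefix-sum table instead of A's backward trimming loop (alternative decomposition, same cost).

-- ===== PORT A =====
-- the while loop: delete trailing parts while the total length exceeds 30 and more than one part remains
def cleanupLoop (parts : List String) (char_count : Int) : List String :=
  if char_count > 30 ∧ parts.length > 1 then
    cleanupLoop parts.dropLast (char_count - PySem.Str.len (parts.getLastD ""))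
  else parts
termination_by parts.length
decreasing_by simp [List.length_dropLast]; omega

def cleanup_name (name : String) : String :=
  let parts := (PySem.Str.split? name ",").getD []   -- sep "," ≠ "", so split? is always `some`
  let char_count := (parts.map (fun i => PySem.Str.len i)).sum
  PySem.Str.join "," (cleanupLoop parts char_count)

-- ===== PORT B =====
def cleanup_name_alt (name : String) : String :=
  let parts := (PySem.Str.split? name ",").getD []   -- sep "," ≠ "", so split? is always `some`
  let cums := ((parts.map (fun p => PySem.Str.len p)).scanl (· + ·) 0).tail
  let keep := max 1 (cums.filter (fun s => s ≤ 30)).length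
  PySem.Str.join "," (parts.take keep)

-- ===== PRECONDITION & SPEC =====
def Spec_cleanup_name (name : String) (out : String) : Prop := out = cleanup_name_alt name
instance (name : String) (out : String) : Decidable (Spec_cleanup_name name out) := by unfold Spec_cleanup_name; infer_instance

-- ===== CLAIM (what is proved, stated in full; the proofs are below) =====
def Claim_equal_cleanup_name : Prop := ∀ (name : String), Dom_cleanup_name name → Spec_cleanup_name name (cleanup_name name)

-- ===== LEMMAS AND PROOFS =====

-- helper view of the scanl-tail prefix sums, for the proofs only
def pvAcc (a : Int) : List Int → List Int
  | [] => []
  | x :: t => (a + x) :: pvAcc (a + x) t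

theorem pvScanl_eq : ∀ (l : List Int) (a : Int), l.scanl (· + ·) a = a :: pvAcc a l := by
  intro l
  induction l with
  | nil => intro a; rfl
  | cons x t ih => intro a; simp only [List.scanl_cons, ih (a + x), pvAcc]

def pvCums (parts : List String) : List Int :=
  ((parts.map (fun p => PySem.Str.len p)).scanl (· + ·) 0).tail

def pvKeep (parts : List String) : Nat :=
  max 1 ((pvCums parts).filter (fun s => s ≤ 30)).length

theorem pvCums_eq (parts : List String) :
    pvCums parts = pvAcc 0 (parts.map (fun p => PySem.Str.len p)) := by
  unfold pvCums
  rw [pvScanl_eq]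
  rfl

theorem pvAcc_append : ∀ (l : List Int) (x a : Int),
    pvAcc a (l ++ [x]) = pvAcc a l ++ [a + l.sum + x] := by
  intro l
  induction l with
  | nil => intro x a; simp [pvAcc]
  | cons y t ih =>
      intro x a
      simp only [List.cons_append, pvAcc, ih x (a + y), List.sum_cons]
      have h : a + y + t.sum = a + (y + t.sum) := by ring
      rw [h]

theorem pvAcc_length : ∀ (l : List Int) (a : Int), (pvAcc a l).length = l.length := by
  intro l
  induction l with
  | nil => intro a; rfl
  | cons y t ih => intro a; simp only [pvAcc, List.length_cons, ih (a + y)]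

theorem pvAcc_le_sum : ∀ (l : List Int) (a : Int), (∀ y ∈ l, 0 ≤ y) →
    ∀ s ∈ pvAcc a l, s ≤ a + l.sum := by
  intro l
  induction l with
  | nil => intro a _ s hs; simp [pvAcc] at hs
  | cons y t ih =>
      intro a hnn s hs
      simp only [pvAcc, List.mem_cons] at hs
      have hty : ∀ z ∈ t, 0 ≤ z := fun z hz => hnn z (List.mem_cons_of_mem _ hz)
      have hsum : 0 ≤ t.sum := List.sum_nonneg hty
      rcases hs with rfl | hs
      · have := hnn y List.mem_cons_self
        simp only [List.sum_cons]
        omega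
      · have := ih (a + y) hty s hs
        simp only [List.sum_cons]
        omega

theorem pvLen_nonneg (s : String) : 0 ≤ PySem.Str.len s := by
  simp [PySem.Str.len_eq]

theorem pvLens_nonneg (l : List String) :
    ∀ y ∈ l.map (fun p => PySem.Str.len p), 0 ≤ y := by
  intro y hy
  rcases List.mem_map.mp hy with ⟨p, _, rfl⟩
  exact pvLen_nonneg p

theorem pvKeep_le (l : List String) (hl : l ≠ []) : pvKeep l ≤ l.length := by
  unfold pvKeep
  have h1 : ((pvCums l).filter (fun s => s ≤ 30)).length ≤ (pvCums l).length :=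
    List.length_filter_le _ _
  have h2 : (pvCums l).length = l.length := by
    rw [pvCums_eq, pvAcc_length, List.length_map]
  have h3 : 1 ≤ l.length := by
    cases l with
    | nil => exact absurd rfl hl
    | cons a t => simp
  omega

-- core invariant: A's trimming loop returns exactly B's kept prefix
theorem pvLoop_eq_take (parts : List String) :
    cleanupLoop parts (parts.map (fun i => PySem.Str.len i)).sum = parts.take (pvKeep parts) := by
  induction parts using List.reverseRecOn with
  | nil => rw [cleanupLoop]; simp
  | append_singleton l x ih =>
      rw [cleanupLoop]
      by_cases hc : (((l ++ [x]).map (fun i => PySem.Str.len i)).sum > 30 ∧ (l ++ [x]).length > 1)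
      · -- trimming step: total > 30 and more than one part
        rw [if_pos hc]
        obtain ⟨hgt, hlen⟩ := hc
        have hl : l ≠ [] := by
          intro h; subst h; simp at hlen
        simp only [List.dropLast_concat, List.getLastD_concat]
        have hsum : ((l ++ [x]).map (fun i => PySem.Str.len i)).sum
            = (l.map (fun i => PySem.Str.len i)).sum + PySem.Str.len x := by
          simp
        rw [hsum, add_sub_cancel_right, ih]
        -- the appended cumulative sum is the total, which exceeds 30, so the counts agree
        have hkeq : pvKeep (l ++ [x]) = pvKeep l := by
          unfold pvKeep
          rw [pvCums_eq, pvCums_eq, List.map_append, List.map_singleton, pvAcc_append]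
          have hgt' : ¬ ((0 + (l.map (fun p => PySem.Str.len p)).sum + PySem.Str.len x) ≤ 30) := by
            rw [hsum] at hgt
            omega
          rw [List.filter_append, List.filter_cons, List.filter_nil,
            if_neg (by simpa using hgt'), List.append_nil]
        rw [hkeq, List.take_append_of_le_length (pvKeep_le l hl)]
      · -- loop does not fire: whole list kept, and B keeps everything too
        rw [if_neg hc]
        by_cases hlen : (l ++ [x]).length > 1
        · -- the total is ≤ 30, so every cumulative sum passes the filter
          have hle : ((l ++ [x]).map (fun i => PySem.Str.len i)).sum ≤ 30 := by
            rcases not_and_or.mp hc with h | h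
            · omega
            · exact absurd hlen h
          have hall : ∀ s ∈ pvCums (l ++ [x]), (fun s => decide (s ≤ 30)) s = true := by
            intro s hs
            rw [pvCums_eq] at hs
            have := pvAcc_le_sum ((l ++ [x]).map (fun p => PySem.Str.len p)) 0
              (pvLens_nonneg _) s hs
            simp only [decide_eq_true_eq]
            omega
          have hfe : ((pvCums (l ++ [x])).filter (fun s => s ≤ 30)) = pvCums (l ++ [x]) :=
            List.filter_eq_self.mpr hall
          unfold pvKeep
          rw [hfe, pvCums_eq, pvAcc_length, List.length_map]
          have h1 : 1 ≤ (l ++ [x]).length := by simp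
          rw [max_eq_right h1, List.take_length]
        · -- a single part: B always keeps at least one
          have hnil : l = [] := by
            cases l with
            | nil => rfl
            | cons a t => simp at hlen
          subst hnil
          unfold pvKeep
          rw [pvCums_eq]
          simp only [List.nil_append, List.map_cons, List.map_nil, pvAcc, List.filter_cons,
            List.filter_nil]
          by_cases h30 : 0 + PySem.Str.len x ≤ 30
          · rw [if_pos (by simpa using h30)]
            simp
          · rw [if_neg (by simpa using h30)]
            simp

-- ===== VERDICT (by name: the statement is the Claim_ definition above) =====
theorem cleanup_name_spec : Claim_equal_cleanup_name := by
  intro name _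
  unfold Spec_cleanup_name
  simp only [cleanup_name, cleanup_name_alt]
  rw [pvLoop_eq_take]
  rfl
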